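-- pv_equiv track=rewrite | github.com/VishalVatsal97/Poshmark_Assignment | assignment.py | serverwithnoprice
-- ===== SOURCE A (Python) =====
-- def serverwithnoprice(no_cpu,sum_li,server_list):
--
--     i = len(server_list)
--     ans = [0 for q in range(i)]
--     while i >= 0 :
--         if no_cpu > sum_li :
--             if sum_li > 0:
--                 incr = no_cpu//sum_li
--                 no_cpu = no_cpu % sum_li
--             else :
--                 ans[0] = ans[0] + 1
--                 break
--             ans= [a + incr for a in ans]
--         else :
--             if server_list[i-1] > 0:
--                 sum_li = sum_li - server_list[i-1]
--             i = i - 1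
--     return ans
-- ===== SOURCE B (Python) =====
-- def serverwithnoprice(no_cpu, sum_li, server_list):
--     # Stage 1: the non-increasing sequence of thresholds the distribution sees
--     # (sum_li minus the running suffix sum of positive server entries).
--     th = [sum_li]
--     b = sum_li
--     for v in reversed(server_list):
--         if v > 0:
--             b -= v
--         th.append(b)
--     # Stage 2: compress to strictly decreasing record minima; a division can
--     # only fire at a new minimum (no_cpu never exceeds any earlier threshold).
--     mins = []
--     for t in th:
--         if not mins or t < mins[-1]:
--             mins.append(t)
--     # Stage 3: run the division cascade over the (short) minima chain.
--     total = 0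
--     bump = False
--     for m in mins:
--         if no_cpu > m:
--             if m > 0:
--                 total += no_cpu // m
--                 no_cpu %= m
--             else:
--                 bump = True
--                 break
--     ans = [total] * len(server_list)
--     if bump:
--         ans[0] += 1
--     return ans
-- ===== Notes on version B (the rewrite author's own statement) =====
-- stated objective: alternative
-- what changed: B works in three staged passes: it first materialises the non-increasing threshold sequence (sum_li minus running suffix sums of positive entries), then compresses it to its strictly decreasing record minima (the only places a division can fire), runs the division cascade over that short minima chain, and builds the answer list once; A interleaves everything in one while loop and rebuilds the whole answer list on every division step.
-- outside the precondition, e.g. on serverwithnoprice(5, 2, []): A raises IndexError, B returns []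
import Mathlib
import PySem

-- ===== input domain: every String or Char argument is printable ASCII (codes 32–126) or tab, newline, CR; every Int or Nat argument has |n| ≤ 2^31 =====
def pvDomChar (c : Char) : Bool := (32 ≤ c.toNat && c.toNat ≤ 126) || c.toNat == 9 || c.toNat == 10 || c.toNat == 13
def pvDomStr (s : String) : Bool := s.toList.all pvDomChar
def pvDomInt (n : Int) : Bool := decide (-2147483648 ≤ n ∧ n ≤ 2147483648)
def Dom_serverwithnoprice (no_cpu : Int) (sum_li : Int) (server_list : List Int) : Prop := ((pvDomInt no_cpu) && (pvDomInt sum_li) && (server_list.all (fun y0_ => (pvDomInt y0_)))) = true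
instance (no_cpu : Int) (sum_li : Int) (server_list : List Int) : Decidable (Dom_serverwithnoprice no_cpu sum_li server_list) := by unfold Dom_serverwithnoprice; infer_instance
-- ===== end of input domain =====

-- B stages the work: it materialises the threshold sequence, compresses it to its strictly
-- decreasing record minima (the only places a division can fire) and runs the division cascade
-- over that short chain, building the answer list once; equivalence on nonempty server lists
-- (A raises IndexError on []).

-- ===== PORT A =====
-- A's while loop: at each iteration either distribute (no_cpu > sum_li) or step i down,
-- using server_list[i-1] (Python negative index at i = 0 via pyGet?).
-- termination measure facts for A's while loop (cited by name in decreasing_by)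
lemma pv_loop_dec1 (no_cpu sum_li i : Int) (h2 : no_cpu > sum_li) (h3 : sum_li > 0) :
    (i + 1).toNat * 2 + (if PySem.Int.mod no_cpu sum_li > sum_li then 1 else 0) <
      (i + 1).toNat * 2 + (if no_cpu > sum_li then 1 else 0) := by
  have := PySem.Int.mod_lt no_cpu h3
  have h : ¬ (PySem.Int.mod no_cpu sum_li > sum_li) := by omega
  simp only [if_neg h, if_pos h2]
  omega

lemma pv_loop_dec2 (nc b b' i : Int) (hge : i ≥ 0) (h2 : ¬ nc > b) :
    (i - 1 + 1).toNat * 2 + (if nc > b' then 1 else 0) <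
      (i + 1).toNat * 2 + (if nc > b then 1 else 0) := by
  simp only [if_neg h2]
  split <;> omega

def serverwithnoprice_loop (server_list : List Int) (no_cpu sum_li i : Int)
    (ans : List Int) : List Int :=
  if hge : i ≥ 0 then
    if h2 : no_cpu > sum_li then
      if h3 : sum_li > 0 then
        let incr := PySem.Int.floordiv no_cpu sum_li
        serverwithnoprice_loop server_list (PySem.Int.mod no_cpu sum_li) sum_li i
          (ans.map (fun a => a + incr))
      else
        -- ans[0] = ans[0] + 1; break  (IndexError on [], excluded by Pre_)
        match ans with
        | [] => []
        | a :: t => (a + 1) :: t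
    else
      let e := (PySem.List.pyGet? server_list (i - 1)).getD 0
      serverwithnoprice_loop server_list no_cpu (if e > 0 then sum_li - e else sum_li) (i - 1) ans
  else ans
termination_by (i + 1).toNat * 2 + (if no_cpu > sum_li then 1 else 0)
decreasing_by
  · exact pv_loop_dec1 no_cpu sum_li i h2 h3
  · exact pv_loop_dec2 no_cpu sum_li _ i hge h2

def serverwithnoprice (no_cpu : Int) (sum_li : Int) (server_list : List Int) : List Int :=
  let i : Int := server_list.length
  let ans : List Int := List.replicate server_list.length 0
  serverwithnoprice_loop server_list no_cpu sum_li i ans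

-- ===== PORT B =====
-- Stage 1 of Source B: th = [sum_li]; for v in reversed(server_list): b -= v if v>0; th.append(b)
def serverwithnoprice_altTh (sum_li : Int) (server_list : List Int) : List Int :=
  (server_list.reverse.foldl
    (fun (st : Int × List Int) v =>
      let b := if v > 0 then st.1 - v else st.1
      (b, st.2 ++ [b]))
    (sum_li, [sum_li])).2

-- Stage 2 of Source B: mins = []; for t in th: if not mins or t < mins[-1]: mins.append(t)
def serverwithnoprice_altMins (th : List Int) : List Int :=
  th.foldl
    (fun mins t =>
      if mins.getLast?.all (fun m => decide (t < m)) then mins ++ [t]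
      else mins)
    []

-- Stage 3 of Source B: for m in mins: divide / bump-and-break
def serverwithnoprice_altCascade (no_cpu total : Int) : List Int → Int × Bool
  | [] => (total, false)
  | m :: rest =>
    if no_cpu > m then
      if m > 0 then
        serverwithnoprice_altCascade (PySem.Int.mod no_cpu m)
          (total + PySem.Int.floordiv no_cpu m) rest
      else (total, true)
    else serverwithnoprice_altCascade no_cpu total rest

def serverwithnoprice_alt (no_cpu : Int) (sum_li : Int) (server_list : List Int) : List Int :=
  let th := serverwithnoprice_altTh sum_li server_list
  let mins := serverwithnoprice_altMins th
  let r := serverwithnoprice_altCascade no_cpu 0 mins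
  let ans := List.replicate server_list.length r.1
  if r.2 then
    match ans with
    | [] => []
    | a :: t => (a + 1) :: t
  else ans

-- ===== PRECONDITION & SPEC =====
-- A raises IndexError on the empty server list (server_list[-1] / ans[0]); excluded.
def Pre_serverwithnoprice (no_cpu : Int) (sum_li : Int) (server_list : List Int) : Prop :=
  server_list ≠ []
instance (no_cpu : Int) (sum_li : Int) (server_list : List Int) : Decidable (Pre_serverwithnoprice no_cpu sum_li server_list) := by unfold Pre_serverwithnoprice; infer_instance

def pvWitness_serverwithnoprice : Int × Int × List Int := (17, 6, [3, 2, 1])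

def Spec_serverwithnoprice (no_cpu : Int) (sum_li : Int) (server_list : List Int) (out : List Int) : Prop := out = serverwithnoprice_alt no_cpu sum_li server_list
instance (no_cpu : Int) (sum_li : Int) (server_list : List Int) (out : List Int) : Decidable (Spec_serverwithnoprice no_cpu sum_li server_list out) := by unfold Spec_serverwithnoprice; infer_instance

-- ===== CLAIM (what is proved, stated in full; the proofs are below) =====
def Claim_equal_serverwithnoprice : Prop := ∀ (no_cpu : Int) (sum_li : Int) (server_list : List Int), Dom_serverwithnoprice no_cpu sum_li server_list → Pre_serverwithnoprice no_cpu sum_li server_list → Spec_serverwithnoprice no_cpu sum_li server_list (serverwithnoprice no_cpu sum_li server_list)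

-- ===== LEMMAS AND PROOFS =====

-- the common "bump the head" shape
def pvBump (ans : List Int) : List Int :=
  match ans with
  | [] => []
  | a :: t => (a + 1) :: t

-- recursive reference form of Stage 1's threshold list
def pvMkTh (b : Int) : List Int → List Int
  | [] => [b]
  | v :: rest => b :: pvMkTh (if v > 0 then b - v else b) rest

def pvTailTh (b : Int) : List Int → List Int
  | [] => []
  | v :: rest =>
    let b' := if v > 0 then b - v else b
    b' :: pvTailTh b' rest

-- recursive reference form of Stage 2's record-minima filter
def pvFilterMins (m : Int) : List Int → List Int
  | [] => []
  | t :: r => if t < m then t :: pvFilterMins t r else pvFilterMins m r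

lemma mkTh_eq_tail (l : List Int) : ∀ b : Int, pvMkTh b l = b :: pvTailTh b l := by
  induction l with
  | nil => intro b; rfl
  | cons v r ih => intro b; simp [pvMkTh, pvTailTh, ih]

lemma altTh_fold (rev : List Int) :
    ∀ (b : Int) (acc : List Int),
      (rev.foldl
        (fun (st : Int × List Int) v =>
          let b := if v > 0 then st.1 - v else st.1
          (b, st.2 ++ [b]))
        (b, acc)).2 = acc ++ pvTailTh b rev := by
  induction rev with
  | nil => intro b acc; simp [pvTailTh]
  | cons v r ih =>
    intro b acc
    simp only [List.foldl_cons, pvTailTh]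
    rw [ih]
    simp

lemma altTh_eq (sum_li : Int) (sl : List Int) :
    serverwithnoprice_altTh sum_li sl = pvMkTh sum_li sl.reverse := by
  unfold serverwithnoprice_altTh
  rw [altTh_fold, mkTh_eq_tail]
  simp

lemma altMins_fold (th : List Int) :
    ∀ (acc : List Int) (m : Int), acc.getLast? = some m →
      th.foldl
        (fun mins t =>
          if mins.getLast?.all (fun m => decide (t < m)) then mins ++ [t]
          else mins)
        acc = acc ++ pvFilterMins m th := by
  induction th with
  | nil => intro acc m _; simp [pvFilterMins]
  | cons t r ih =>
    intro acc m hm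
    simp only [List.foldl_cons, hm, Option.all_some, pvFilterMins]
    by_cases h : t < m
    · rw [if_pos (by simp [h]), ih (acc ++ [t]) t (by simp)]
      simp [h]
    · rw [if_neg (by simp [h]), ih acc m hm]
      simp [h]

lemma altMins_eq (th : List Int) :
    serverwithnoprice_altMins th =
      (match th with | [] => [] | b :: r => b :: pvFilterMins b r) := by
  unfold serverwithnoprice_altMins
  cases th with
  | nil => rfl
  | cons b r =>
    simp only [List.foldl_cons, List.getLast?_nil, Option.all_none, if_true,
      List.nil_append]
    rw [altMins_fold r [b] b (by simp)]
    simp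

lemma cascade_filterMins (r : List Int) :
    ∀ (m nc t : Int), nc ≤ m →
      serverwithnoprice_altCascade nc t (pvFilterMins m r) =
        serverwithnoprice_altCascade nc t r := by
  induction r with
  | nil => intro m nc t _; rfl
  | cons v rest ih =>
    intro m nc t hle
    simp only [pvFilterMins]
    by_cases h : v < m
    · rw [if_pos h]
      simp only [serverwithnoprice_altCascade]
      split_ifs with h2 h3
      · exact ih v _ _ (le_of_lt (PySem.Int.mod_lt nc h3))
      · rfl
      · exact ih v nc t (by omega)
    · rw [if_neg h]
      conv_rhs => rw [serverwithnoprice_altCascade]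
      rw [if_neg (show ¬ nc > v by omega)]
      exact ih m nc t hle

lemma cascade_mins (l : List Int) (nc t : Int) :
    serverwithnoprice_altCascade nc t
        (match l with | [] => [] | b :: r => b :: pvFilterMins b r) =
      serverwithnoprice_altCascade nc t l := by
  cases l with
  | nil => rfl
  | cons b r =>
    simp only [serverwithnoprice_altCascade]
    split_ifs with h2 h3
    · exact cascade_filterMins r b _ _ (le_of_lt (PySem.Int.mod_lt nc h3))
    · rfl
    · exact cascade_filterMins r b nc t (by omega)

lemma A_bridge (sl : List Int) :
    ∀ (k : Nat) (no_cpu sum_li t : Int), k ≤ sl.length →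
      serverwithnoprice_loop sl no_cpu sum_li (k : Int) (List.replicate sl.length t) =
        (let r := serverwithnoprice_altCascade no_cpu t (pvMkTh sum_li ((sl.take k).reverse))
         if r.2 then pvBump (List.replicate sl.length r.1)
         else List.replicate sl.length r.1) := by
  intro k
  induction k with
  | zero =>
    intro no_cpu sum_li t _
    rw [serverwithnoprice_loop.eq_def]
    simp only [Nat.cast_zero, List.take_zero, List.reverse_nil, pvMkTh,
      serverwithnoprice_altCascade]
    by_cases h2 : no_cpu > sum_li
    · by_cases h3 : sum_li > 0
      · have hm : ¬ (sum_li < no_cpu % sum_li) := by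
          have := Int.emod_lt_of_pos no_cpu h3
          omega
        norm_num [h2, h3, List.map_replicate]
        rw [serverwithnoprice_loop.eq_def]
        norm_num [hm]
        rw [serverwithnoprice_loop.eq_def]
        norm_num
      · norm_num [h2, h3, pvBump]
    · norm_num [h2]
      rw [serverwithnoprice_loop.eq_def]
      norm_num
  | succ k ih =>
    intro no_cpu sum_li t hk
    have hklt : k < sl.length := by omega
    have htake : (sl.take (k + 1)).reverse = sl[k] :: (sl.take k).reverse := by
      rw [List.take_add_one]
      simp [List.getElem?_eq_getElem hklt]
    have hcast : ((k + 1 : Nat) : Int) - 1 = (k : Nat) := by push_cast; ring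
    have hget : (PySem.List.pyGet? sl (((k + 1 : Nat) : Int) - 1)).getD 0 = sl[k] := by
      rw [hcast, PySem.List.pyGet?_natCast]
      simp [List.getElem?_eq_getElem hklt]
    have hge : ((k + 1 : Nat) : Int) ≥ 0 := by positivity
    rw [serverwithnoprice_loop.eq_def, htake]
    simp only [pvMkTh, serverwithnoprice_altCascade]
    by_cases h2 : no_cpu > sum_li
    · by_cases h3 : sum_li > 0
      · have hm : ¬ (sum_li < no_cpu % sum_li) := by
          have := Int.emod_lt_of_pos no_cpu h3
          omega
        have hge' : (0:Int) ≤ (k:Int) + 1 := by positivity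
        norm_num [h2, h3, List.map_replicate]
        rw [serverwithnoprice_loop.eq_def]
        norm_num [hm, hge', List.getElem?_eq_getElem hklt]
        rw [ih _ _ _ (by omega)]
    --    simp only [pvMkTh]
      · norm_num [h2, h3, pvBump, show (0:Int) ≤ (k:Int)+1 by positivity]
    · norm_num [h2, show (0:Int) ≤ (k:Int)+1 by positivity, List.getElem?_eq_getElem hklt]
      rw [ih _ _ _ (by omega)]

-- ===== VERDICT =====
theorem serverwithnoprice_spec : Claim_equal_serverwithnoprice := by
  intro no_cpu sum_li sl _ _
  unfold Spec_serverwithnoprice serverwithnoprice serverwithnoprice_alt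
  simp only [altTh_eq, altMins_eq, cascade_mins]
  rw [A_bridge sl sl.length no_cpu sum_li 0 (le_refl _)]
  simp [pvBump, List.take_length]
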